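-- pv_equiv track=rewrite | github.com/benbrock26/Video-Poker | Python/source/ben/test/poker_hand_hand_analyzer_evaluator.py | sort_according_to_pairs
-- ===== SOURCE A (Python) =====
-- import collections
--
-- def get_numeric_value(num):
--     values = {
--         "T": 10,
--         "J": 11,
--         "Q": 12,
--         "K": 13,
--         "A": 14
--     }
--     return values[num] if num in values else int(num)
--
-- def sort_according_to_pairs(hand):
--     nums = [get_numeric_value(c[0]) for c in hand]
--     common = [c for c in collections.Counter(nums).most_common(5)]
--
--     common.sort(key=lambda x: x[1] * 100 + x[0], reverse=True)
--
--     result = []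
--     #n stands for the number, f stands for the number of times it appears
--     for n, f in common:
--         result += [n] * int(f)
--     return result
-- ===== SOURCE B (Python) =====
-- RANKS = "0123456789TJQKA"
--
-- def sort_according_to_pairs(hand):
--     counts = [0] * 15
--     for c in hand:
--         counts[RANKS.index(c[0])] += 1
--     out = []
--     for f in range(len(hand), 0, -1):
--         for v in range(14, -1, -1):
--             if counts[v] == f:
--                 out += [v] * f
--     return out
-- ===== Notes on version B (the rewrite author's own statement) =====
-- stated objective: alternative
-- what changed: B replaces A's Counter/most_common/two comparison sorts plus rebuild loop by a 15-bucket counting sort: tally ranks into a fixed array, then emit values by descending frequency and descending value directly.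
-- outside the precondition, e.g. on sort_according_to_pairs(['2s', '3s', '4s', '5s', '6s', '7s']): A returns [6, 5, 4, 3, 2], B returns [7, 6, 5, 4, 3, 2]
import Mathlib
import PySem

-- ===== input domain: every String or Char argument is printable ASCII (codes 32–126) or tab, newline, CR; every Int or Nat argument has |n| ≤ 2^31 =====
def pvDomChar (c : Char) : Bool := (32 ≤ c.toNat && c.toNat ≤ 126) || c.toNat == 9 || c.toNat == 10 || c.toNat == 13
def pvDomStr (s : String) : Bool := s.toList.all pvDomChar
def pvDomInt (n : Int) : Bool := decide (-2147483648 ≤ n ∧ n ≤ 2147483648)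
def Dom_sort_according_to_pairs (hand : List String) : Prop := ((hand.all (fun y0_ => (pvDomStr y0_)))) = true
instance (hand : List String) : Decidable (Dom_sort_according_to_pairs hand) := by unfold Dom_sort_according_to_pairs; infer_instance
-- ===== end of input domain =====

-- B replaces A's Counter/most_common/double-sort pipeline by a 15-bucket counting sort over the
-- fixed rank alphabet (objective: alternative algorithm, no comparison sort).

-- ===== PORT A =====
def pvCardValues : PySem.Dict String Int :=
  ((((PySem.Dict.empty.insert "T" 10).insert "J" 11).insert "Q" 12).insert "K" 13).insert "A" 14

-- values[num] if num in values else int(num); none = ValueError from int()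
def get_numeric_value (num : String) : Option Int :=
  if pvCardValues.contains num then pvCardValues.get? num
  else PySem.Int.ofStr? num

def sort_according_to_pairs (hand : List String) : List Int :=
  match hand.mapM (fun c => (PySem.Str.pyGet? c 0).bind fun ch => get_numeric_value (String.ofList [ch])) with
  | none => []   -- a card raised IndexError/ValueError; such hands are excluded by Pre_
  | some nums =>
    let common := (PySem.List.sorted (PySem.Dict.counter nums).items (fun x => x.2) true).take 5
    let common2 := PySem.List.sorted common (fun x => x.2 * 100 + x.1) true
    common2.foldl (fun result x => result ++ List.replicate x.2.toNat x.1) []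

-- ===== PORT B =====
def pvRanksStr : String := "0123456789TJQKA"

def sort_according_to_pairs_alt (hand : List String) : List Int :=
  match hand.foldlM (fun (counts : List Int) c =>
      (PySem.Str.pyGet? c 0).bind fun ch =>
        let i := PySem.Chars.find pvRanksStr.toList [ch]  -- RANKS.index raises ValueError when absent
        if i = -1 then none
        else some (counts.set i.toNat (counts.getD i.toNat 0 + 1))) (List.replicate 15 (0 : Int)) with
  | none => []   -- a card raised; such hands are excluded by Pre_
  | some counts =>
    (PySem.List.pyRange (hand.length : Int) 0 (-1)).foldl (fun out f =>
      (PySem.List.pyRange 14 (-1) (-1)).foldl (fun out v =>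
        -- counts[v]: v is always in range 0..14, so getD is exact here
        if counts.getD v.toNat 0 = f then out ++ List.replicate f.toNat v else out) out) []

-- the rank alphabet as a literal character list (shared data; used by Pre_ and the proofs)
def pvRanksChars : List Char := ['0','1','2','3','4','5','6','7','8','9','T','J','Q','K','A']

-- ===== PRECONDITION & SPEC =====
-- Pre_ admits hands of valid cards (first character a rank 0-9/T/J/Q/K/A) with at most 5 distinct
-- ranks; on more than 5 distinct ranks A's most_common(5) silently drops the excess ranks, and on an
-- invalid card both programs raise (IndexError/ValueError).
def Pre_sort_according_to_pairs (hand : List String) : Prop :=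
  (∀ s ∈ hand, s.toList ≠ [] ∧ s.toList.headI ∈ pvRanksChars) ∧
  (PySem.Set.ofList (hand.map (fun s => s.toList.headI))).length ≤ 5

instance (hand : List String) : Decidable (Pre_sort_according_to_pairs hand) := by
  unfold Pre_sort_according_to_pairs; infer_instance

def pvWitness_sort_according_to_pairs : List String := ["2s", "2h", "Kd", "7c", "7d"]

def Spec_sort_according_to_pairs (hand : List String) (out : List Int) : Prop := out = sort_according_to_pairs_alt hand
instance (hand : List String) (out : List Int) : Decidable (Spec_sort_according_to_pairs hand out) := by unfold Spec_sort_according_to_pairs; infer_instance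

-- ===== CLAIM (what is proved, stated in full; the proofs are below) =====
def Claim_equal_sort_according_to_pairs : Prop := ∀ (hand : List String), Dom_sort_according_to_pairs hand → Pre_sort_according_to_pairs hand → Spec_sort_according_to_pairs hand (sort_according_to_pairs hand)

-- ===== LEMMAS AND PROOFS =====

def pvValid (s : String) : Prop := s.toList ≠ [] ∧ s.toList.headI ∈ pvRanksChars

def pvVal (ch : Char) : Int := PySem.Chars.find pvRanksChars [ch]

def pvNums (hand : List String) : List Int := hand.map (fun s => pvVal s.toList.headI)

def pvCnt (hand : List String) (v : Int) : Int := (List.count v (pvNums hand) : Int)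

def pvV14 : List Int := [14, 13, 12, 11, 10, 9, 8, 7, 6, 5, 4, 3, 2, 1, 0]

def pvFR (hand : List String) : List Int := PySem.List.pyRange (hand.length : Int) 0 (-1)

def pvL (hand : List String) : List (Int × Int) :=
  (pvFR hand).flatMap (fun fr => (pvV14.filter (fun v => decide (pvCnt hand v = fr))).map (fun v => (v, fr)))

lemma pvRanks_eq : pvRanksStr.toList = pvRanksChars := by decide

lemma pvVal_facts : ∀ ch ∈ pvRanksChars,
    0 ≤ pvVal ch ∧ pvVal ch ≤ 14 ∧ get_numeric_value (String.ofList [ch]) = some (pvVal ch) := by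
  intro ch hch
  fin_cases hch <;> decide

lemma pvV14_eq : PySem.List.pyRange 14 (-1) (-1) = pvV14 := by decide

lemma mem_pvV14 {v : Int} : v ∈ pvV14 ↔ 0 ≤ v ∧ v ≤ 14 := by
  simp [pvV14]; omega

lemma pvA_conv (s : String) (h : pvValid s) :
    ((PySem.Str.pyGet? s 0).bind fun ch => get_numeric_value (String.ofList [ch])) = some (pvVal s.toList.headI) := by
  obtain ⟨h1, h2⟩ := h
  obtain ⟨ch, t, hs⟩ : ∃ ch t, s.toList = ch :: t := by
    cases hl : s.toList with
    | nil => exact absurd hl h1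
    | cons a b => exact ⟨a, b, rfl⟩
  have hget : PySem.Str.pyGet? s 0 = s.toList[0]? := by
    simpa using PySem.Str.pyGet?_natCast s 0
  rw [hget, hs]
  have hch : ch ∈ pvRanksChars := by rw [hs] at h2; simpa using h2
  have := (pvVal_facts ch hch).2.2
  simp only [hs, List.headI_cons] at *
  simp [this]

lemma pvB_step (counts : List Int) (s : String) (h : pvValid s) :
    ((PySem.Str.pyGet? s 0).bind fun ch =>
        let i := PySem.Chars.find pvRanksStr.toList [ch]
        if i = -1 then none
        else some (counts.set i.toNat (counts.getD i.toNat 0 + 1)))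
      = some (counts.set (pvVal s.toList.headI).toNat (counts.getD (pvVal s.toList.headI).toNat 0 + 1)) := by
  obtain ⟨h1, h2⟩ := h
  obtain ⟨ch, t, hs⟩ : ∃ ch t, s.toList = ch :: t := by
    cases hl : s.toList with
    | nil => exact absurd hl h1
    | cons a b => exact ⟨a, b, rfl⟩
  have hget : PySem.Str.pyGet? s 0 = s.toList[0]? := by
    simpa using PySem.Str.pyGet?_natCast s 0
  rw [hget, hs]
  have hch : ch ∈ pvRanksChars := by rw [hs] at h2; simpa using h2
  have hnn : 0 ≤ pvVal ch := (pvVal_facts ch hch).1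
  have hne : ¬ (pvVal ch = -1) := by omega
  simp only [List.headI_cons, pvRanks_eq]
  simp only [pvVal] at hne ⊢
  simp [hne]

lemma pvA_mapM (hand : List String) (h : ∀ s ∈ hand, pvValid s) :
    hand.mapM (fun c => (PySem.Str.pyGet? c 0).bind fun ch => get_numeric_value (String.ofList [ch]))
      = some (pvNums hand) := by
  induction hand with
  | nil => rfl
  | cons s rest ih =>
    have hs := pvA_conv s (h s (by simp))
    have hrest := ih (fun x hx => h x (by simp [hx]))
    simp only [List.mapM_cons]
    rw [hs, hrest]
    simp [pvNums]

lemma pv_getD_set (l : List Int) (a : Int) (j k : Nat) (hj : j < l.length) :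
    (l.set j a).getD k 0 = if j = k then a else l.getD k 0 := by
  rw [List.getD_eq_getElem?_getD, List.getD_eq_getElem?_getD, List.getElem?_set]
  split_ifs with h
  · simp
  · rfl

lemma pvB_fold (hand : List String) : ∀ counts : List Int, (∀ s ∈ hand, pvValid s) → counts.length = 15 →
    ∃ r, hand.foldlM (fun (counts : List Int) c =>
        (PySem.Str.pyGet? c 0).bind fun ch =>
          let i := PySem.Chars.find pvRanksStr.toList [ch]
          if i = -1 then none
          else some (counts.set i.toNat (counts.getD i.toNat 0 + 1))) counts = some r ∧
      r.length = 15 ∧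
      ∀ k : Nat, k < 15 → r.getD k 0 = counts.getD k 0 + (List.count (k : Int) (pvNums hand) : Int) := by
  induction hand with
  | nil => intro counts _ hlen; exact ⟨counts, rfl, hlen, by simp [pvNums]⟩
  | cons s rest ih =>
    intro counts h hlen
    have hvs : pvValid s := h s (by simp)
    have hch : s.toList.headI ∈ pvRanksChars := hvs.2
    have hb := (pvVal_facts _ hch).1
    have hb14 := (pvVal_facts _ hch).2.1
    have hjlt : (pvVal s.toList.headI).toNat < 15 := by omega
    set j := (pvVal s.toList.headI).toNat with hj
    set counts' := counts.set j (counts.getD j 0 + 1) with hc'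
    obtain ⟨r, hr, hrl, hrk⟩ := ih counts' (fun x hx => h x (by simp [hx])) (by simp [hc', hlen])
    refine ⟨r, ?_, hrl, ?_⟩
    · rw [List.foldlM_cons, pvB_step counts s hvs]
      simpa using hr
    · intro k hk
      rw [hrk k hk, hc', pv_getD_set counts _ j k (by omega)]
      have hcount : List.count (k : Int) (pvNums (s :: rest))
          = (if pvVal s.toList.headI = (k : Int) then 1 else 0) + List.count (k : Int) (pvNums rest) := by
        simp [pvNums, List.count_cons]
        split_ifs <;> omega
      rw [hcount]
      by_cases hjk : j = k
      · have : pvVal s.toList.headI = (k : Int) := by omega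
        simp [hjk, this]; ring
      · have : ¬ (pvVal s.toList.headI = (k : Int)) := by omega
        simp [hjk, this]

lemma pv_foldl_if_append (p : Int → Bool) (g : Int → List Int) :
    ∀ (l : List Int) (acc : List Int),
      l.foldl (fun acc v => if p v then acc ++ g v else acc) acc
        = acc ++ (l.filter p).flatMap g := by
  intro l
  induction l with
  | nil => intro acc; simp
  | cons x xs ih =>
    intro acc
    by_cases hx : p x
    · simp [hx, ih]
    · simp [hx, ih]

lemma pv_outer (counts : List Int) :
    ∀ (frs : List Int) (acc : List Int),
      frs.foldl (fun out f =>
          pvV14.foldl (fun out v =>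
            if counts.getD v.toNat 0 = f then out ++ List.replicate f.toNat v else out) out) acc
        = acc ++ frs.flatMap (fun fr =>
            (pvV14.filter (fun v => decide (counts.getD v.toNat 0 = fr))).flatMap
              (fun v => List.replicate fr.toNat v)) := by
  intro frs
  induction frs with
  | nil => intro acc; simp
  | cons f fs ih =>
    intro acc
    rw [List.foldl_cons, ih]
    have hinner := pv_foldl_if_append (fun v => decide (counts.getD v.toNat 0 = f))
      (fun v => List.replicate f.toNat v) pvV14 acc
    simp only [decide_eq_true_eq] at hinner
    rw [hinner]
    simp [List.append_assoc]

lemma pv_flatMap_pairs (l : List Int) (s : Int → List Int) (h : Int × Int → List Int) :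
    (l.flatMap (fun fr => (s fr).map (fun v => (v, fr)))).flatMap h
      = l.flatMap (fun fr => (s fr).flatMap (fun v => h (v, fr))) := by
  induction l with
  | nil => rfl
  | cons x xs ih => simp [List.flatMap_cons, ih, List.flatMap_append, List.flatMap_map]

lemma pv_pairwise_flatMap {α : Type} (R : α → α → Prop) (l : List Int) (f : Int → List α)
    (h1 : ∀ x ∈ l, (f x).Pairwise R)
    (h2 : l.Pairwise (fun a b => ∀ p ∈ f a, ∀ q ∈ f b, R p q)) :
    (l.flatMap f).Pairwise R := by
  induction l with
  | nil => simp
  | cons x xs ih =>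
    rw [List.flatMap_cons, List.pairwise_append]
    refine ⟨h1 x (by simp), ih (fun y hy => h1 y (by simp [hy])) (List.Pairwise.sublist (by simp) h2), ?_⟩
    intro p hp q hq
    rw [List.mem_flatMap] at hq
    obtain ⟨y, hy, hqy⟩ := hq
    exact (List.rel_of_pairwise_cons h2 hy) p hp q hqy

lemma pv_mem_nums_bounds (hand : List String) (h : ∀ s ∈ hand, pvValid s) :
    ∀ v ∈ pvNums hand, 0 ≤ v ∧ v ≤ 14 := by
  intro v hv
  rw [pvNums, List.mem_map] at hv
  obtain ⟨s, hs, rfl⟩ := hv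
  exact ⟨(pvVal_facts _ (h s hs).2).1, (pvVal_facts _ (h s hs).2).2.1⟩

lemma pv_mem_L (hand : List String) (p : Int × Int) :
    p ∈ pvL hand ↔ (0 ≤ p.1 ∧ p.1 ≤ 14 ∧ pvCnt hand p.1 = p.2 ∧ 0 < p.2 ∧ p.2 ≤ (hand.length : Int)) := by
  obtain ⟨v, fr⟩ := p
  simp only [pvL, List.mem_flatMap, List.mem_map, List.mem_filter, pvFR,
    PySem.List.mem_pyRange_neg_one, decide_eq_true_eq]
  constructor
  · rintro ⟨f', ⟨hgt, hle⟩, v', ⟨hv14, hcnt⟩, heq⟩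
    injection heq with e1 e2
    subst e1; subst e2
    have hb := mem_pvV14.mp hv14
    exact ⟨hb.1, hb.2, hcnt, hgt, hle⟩
  · rintro ⟨h0, h14, hcnt, hpos, hle⟩
    exact ⟨fr, ⟨hpos, hle⟩, v, ⟨mem_pvV14.mpr ⟨h0, h14⟩, hcnt⟩, rfl⟩

-- key strictly decreases along pvL
lemma pv_L_pairwise (hand : List String) :
    (pvL hand).Pairwise (fun a b => b.2 * 100 + b.1 < a.2 * 100 + a.1) := by
  refine pv_pairwise_flatMap _ _ _ ?_ ?_
  · intro fr _
    have hv : (pvV14.filter (fun v => decide (pvCnt hand v = fr))).Pairwise (fun a b => b < a) :=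
      List.Pairwise.filter _ (by decide : pvV14.Pairwise (fun a b => b < a))
    refine List.Pairwise.map _ ?_ hv
    intro a b hab
    simpa using by omega
  · have hfr : (pvFR hand).Pairwise (fun a b => b < a) := by
      rw [pvFR, PySem.List.pyRange_neg_one]
      refine List.Pairwise.map _ ?_ (List.pairwise_lt_range) 
      intro a b h
      omega
    refine hfr.imp_of_mem ?_
    intro f1 f2 _ _ hlt p hp q hq
    rw [List.mem_map] at hp hq
    obtain ⟨v1, hv1, rfl⟩ := hp
    obtain ⟨v2, hv2, rfl⟩ := hq
    have hb1 := mem_pvV14.mp (List.mem_of_mem_filter hv1)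
    have hb2 := mem_pvV14.mp (List.mem_of_mem_filter hv2)
    simp only []
    omega

lemma pv_L_perm_items (hand : List String) (h : ∀ s ∈ hand, pvValid s) :
    (pvL hand).Perm ((PySem.Dict.counter (pvNums hand)).items) := by
  rw [PySem.Dict.items_counter]
  have hnodupL : (pvL hand).Nodup :=
    (pv_L_pairwise hand).imp (fun {a b} hab => by rintro rfl; omega)
  have hnodupI : (List.map (fun k => (k, (List.count k (pvNums hand) : Int))) (PySem.Set.ofList (pvNums hand))).Nodup := by
    refine List.Nodup.map ?_ (PySem.Set.nodup_ofList _)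
    intro a b hab
    simpa using congrArg Prod.fst hab
  rw [List.perm_ext_iff_of_nodup hnodupL hnodupI]
  intro p
  rw [pv_mem_L]
  simp only [List.mem_map, PySem.Set.mem_ofList]
  obtain ⟨v, fr⟩ := p
  constructor
  · rintro ⟨h0, h14, hcnt, hpos, hle⟩
    refine ⟨v, ?_, ?_⟩
    · rw [← List.count_pos_iff]
      unfold pvCnt at hcnt
      rw [← hcnt] at hpos
      exact_mod_cast hpos
    · unfold pvCnt at hcnt
      rw [hcnt]
  · rintro ⟨k, hk, heq⟩
    injection heq with e1 e2
    have hb := pv_mem_nums_bounds hand h k hk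
    have hpos : 0 < List.count k (pvNums hand) := List.count_pos_iff.mpr hk
    have hle : List.count k (pvNums hand) ≤ (pvNums hand).length := List.count_le_length
    have hlen : (pvNums hand).length = hand.length := by simp [pvNums]
    refine ⟨e1 ▸ hb.1, e1 ▸ hb.2, ?_, ?_, ?_⟩
    · rw [← e1]
      unfold pvCnt
      exact e2
    · rw [← e2]
      simpa using hpos
    · rw [← e2]
      rw [hlen] at hle
      simpa using hle

lemma pv_distinct_le (hand : List String)
    (h5 : (PySem.Set.ofList (hand.map (fun s => s.toList.headI))).length ≤ 5) :
    (PySem.Set.ofList (pvNums hand)).length ≤ 5 := by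
  have hsub : PySem.Set.ofList (pvNums hand) ⊆ List.map pvVal (PySem.Set.ofList (hand.map (fun s => s.toList.headI))) := by
    intro y hy
    rw [PySem.Set.mem_ofList, pvNums] at hy
    rw [List.mem_map]
    obtain ⟨s, hs, rfl⟩ := List.mem_map.mp hy
    exact ⟨s.toList.headI, (PySem.Set.mem_ofList _ _).mpr (List.mem_map.mpr ⟨s, hs, rfl⟩), rfl⟩
  have := (List.subperm_of_subset (PySem.Set.nodup_ofList _) hsub).length_le
  simpa using le_trans this (by simpa using h5)

-- ===== VERDICT (by name: the statement is the Claim_ definition above) =====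
theorem sort_according_to_pairs_spec : Claim_equal_sort_according_to_pairs := by
  intro hand _ hpre
  obtain ⟨hvalid, h5⟩ := hpre
  have hvalid' : ∀ s ∈ hand, pvValid s := hvalid
  obtain ⟨r, hr, hrl, hrk⟩ := pvB_fold hand (List.replicate 15 (0 : Int)) hvalid' (by simp)
  have hA : sort_according_to_pairs hand
      = (PySem.List.sorted
          ((PySem.List.sorted (PySem.Dict.counter (pvNums hand)).items (fun x => x.2) true).take 5)
          (fun x => x.2 * 100 + x.1) true).foldl
            (fun result x => result ++ List.replicate x.2.toNat x.1) [] := by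
    unfold sort_according_to_pairs
    rw [pvA_mapM hand hvalid']
  have hB : sort_according_to_pairs_alt hand
      = (PySem.List.pyRange (hand.length : Int) 0 (-1)).foldl (fun out f =>
          (PySem.List.pyRange 14 (-1) (-1)).foldl (fun out v =>
            if r.getD v.toNat 0 = f then out ++ List.replicate f.toNat v else out) out) [] := by
    unfold sort_according_to_pairs_alt
    rw [hr]
  unfold Spec_sort_according_to_pairs
  rw [hA, hB]
  simp only [pvV14_eq]
  have hlen : ((PySem.List.sorted (PySem.Dict.counter (pvNums hand)).items (fun x => x.2) true).take 5)
      = PySem.List.sorted (PySem.Dict.counter (pvNums hand)).items (fun x => x.2) true := by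
    apply List.take_of_length_le
    rw [PySem.List.length_sorted, PySem.Dict.items_counter, List.length_map]
    exact pv_distinct_le hand h5
  rw [hlen]
  have hperm : (pvL hand).Perm (PySem.List.sorted (PySem.Dict.counter (pvNums hand)).items (fun x => x.2) true) :=
    (pv_L_perm_items hand hvalid').trans (PySem.List.sorted_perm _ _ _).symm
  have hc2 : PySem.List.sorted
      (PySem.List.sorted (PySem.Dict.counter (pvNums hand)).items (fun x => x.2) true)
      (fun x : Int × Int => x.2 * 100 + x.1) true = pvL hand :=
    PySem.List.sorted_rev_eq_of_perm_of_pairwise_gt _ _ _ hperm (pv_L_pairwise hand)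
  rw [hc2]
  rw [PySem.List.foldl_append_eq_flatMap (fun x : Int × Int => List.replicate x.2.toNat x.1) (pvL hand) []]
  rw [pv_outer r]
  simp only [List.nil_append]
  have hfix : ∀ fr : Int,
      (pvV14.filter (fun v => decide (r.getD v.toNat 0 = fr)))
        = (pvV14.filter (fun v => decide (pvCnt hand v = fr))) := by
    intro fr
    apply List.filter_congr
    intro v hv
    have hb := mem_pvV14.mp hv
    have h15 : v.toNat < 15 := by omega
    have hre := hrk v.toNat h15
    have h0 : (List.replicate 15 (0 : Int)).getD v.toNat 0 = 0 := by
      interval_cases h : v.toNat <;> rfl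
    have hvcast : ((v.toNat : Nat) : Int) = v := Int.toNat_of_nonneg hb.1
    rw [h0, zero_add, hvcast] at hre
    have h2 : r.getD v.toNat 0 = pvCnt hand v := hre
    rw [h2]
  rw [pvL, pv_flatMap_pairs]
  rw [show PySem.List.pyRange ((hand.length : Int)) 0 (-1) = pvFR hand from rfl]
  congr 1
  funext fr
  rw [hfix fr]
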